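-- pv_equiv track=rewrite | github.com/INM-6/Python-Module-of-the-Week | session28_ModernPython/NamedTuple.py | analyse_string
-- ===== SOURCE A (Python) =====
-- from itertools import zip_longest
--
-- def analyse_string(string):
--     qs = string.count('q')
--     ingredients = sorted(list(set(string)))
--     d_p = sum((ord(s_c) - ord(s_p))**2 for s_c, s_p in zip_longest(
--         string,
--         'pineapple',
--         fillvalue=chr(0)))
--     return (qs, ingredients, d_p)
-- ===== SOURCE B (Python) =====
-- def analyse_string(string):
--     P = 'pineapple'
--     # one frequency pass serves both the q-count and the unique characters
--     freq = {}
--     for c in string: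
--         freq[c] = freq.get(c, 0) + 1
--     qs = freq.get('q', 0)
--     ingredients = sorted(freq)
--     # (a-b)^2 summed over chr(0)-padded sequences expands to
--     # sum(a^2) + sum(b^2) - 2*sum(a*b over the overlap): padding terms vanish.
--     d_p = sum(ord(c) ** 2 for c in string) + sum(ord(c) ** 2 for c in P) \
--         - 2 * sum(ord(a) * ord(b) for a, b in zip(string, P))
--     return (qs, ingredients, d_p)
-- ===== Notes on version B (the rewrite author's own statement) =====
-- stated objective: alternative
-- what changed: B builds one character-frequency dict whose lookup gives the q-count and whose keys give the unique characters (no str.count, no set), and computes the distance by the algebraic expansion sum(a^2)+sum(b^2)-2*sum(a*b over the overlap) instead of zip_longest with chr(0) padding.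
import Mathlib
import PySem

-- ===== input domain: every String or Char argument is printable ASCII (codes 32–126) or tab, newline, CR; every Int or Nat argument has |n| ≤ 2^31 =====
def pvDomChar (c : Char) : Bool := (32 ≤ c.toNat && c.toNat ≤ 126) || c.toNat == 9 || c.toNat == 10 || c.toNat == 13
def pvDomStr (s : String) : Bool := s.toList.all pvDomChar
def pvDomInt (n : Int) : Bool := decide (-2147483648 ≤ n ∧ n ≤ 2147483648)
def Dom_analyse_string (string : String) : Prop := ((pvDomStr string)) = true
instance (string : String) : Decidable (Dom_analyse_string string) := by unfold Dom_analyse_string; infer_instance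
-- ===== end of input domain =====

-- B builds one frequency dict (its lookup = the q-count, its keys = the unique characters) and computes the
-- distance by the expansion sum(a^2)+sum(b^2)-2*sum(a*b over the overlap) instead of zip_longest chr(0) padding.

-- ===== PORT A =====
-- itertools.zip_longest(xs, ys, fillvalue=fill), for two character sequences
def pvZipLongest (xs ys : List Char) (fill : Char) : List (Char × Char) :=
  match xs, ys with
  | [], [] => []
  | x :: xs, [] => (x, fill) :: pvZipLongest xs [] fill
  | [], y :: ys => (fill, y) :: pvZipLongest [] ys fill
  | x :: xs, y :: ys => (x, y) :: pvZipLongest xs ys fill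

def analyse_string (string : String) : Int × List String × Int :=
  let qs := PySem.Str.count string "q"
  let ingredients := PySem.List.sorted
    (PySem.Set.ofList (string.toList.map (fun c => String.mk [c]))) (fun x => x) false
  let d_p := ((pvZipLongest string.toList "pineapple".toList (Char.ofNat 0)).map
      (fun p => ((p.1.toNat : Int) - (p.2.toNat : Int)) ^ 2)).sum
  (qs, ingredients, d_p)

-- ===== PORT B =====
def analyse_string_alt (string : String) : Int × List String × Int :=
  let P : List Char := "pineapple".toList
  let s := string.toList
  -- for c in string: freq[c] = freq.get(c, 0) + 1   (a character of a Python str is a length-1 str)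
  let freq : PySem.Dict String Int :=
    s.foldl (fun d c => d.insert (String.mk [c]) (d.getD (String.mk [c]) 0 + 1)) PySem.Dict.empty
  let qs := freq.getD "q" 0
  let ingredients := PySem.List.sorted freq.keys (fun x => x) false
  let d_p := (s.map (fun c => ((c.toNat : Int)) ^ 2)).sum
    + (P.map (fun c => ((c.toNat : Int)) ^ 2)).sum
    - 2 * ((s.zip P).map (fun p => (p.1.toNat : Int) * (p.2.toNat : Int))).sum
  (qs, ingredients, d_p)

-- ===== PRECONDITION & SPEC =====
def Spec_analyse_string (string : String) (out : Int × List String × Int) : Prop := out = analyse_string_alt string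
instance (string : String) (out : Int × List String × Int) : Decidable (Spec_analyse_string string out) := by unfold Spec_analyse_string; infer_instance

-- ===== CLAIM (what is proved, stated in full; the proofs are below) =====
def Claim_equal_analyse_string : Prop := ∀ (string : String), Dom_analyse_string string → Spec_analyse_string string (analyse_string string)

-- ===== LEMMAS AND PROOFS =====

-- str.count with a single-character needle counts occurrences of that character
lemma pvCountGo_single (c : Char) (s : List Char) (fuel acc : Nat) (h : s.length ≤ fuel) :
    PySem.Chars.count.go [c] fuel s acc = acc + s.count c := by
  induction fuel generalizing s acc with
  | zero =>
    cases s with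
    | nil => simp [PySem.Chars.count.go]
    | cons x t => simp at h
  | succ fuel ih =>
    cases s with
    | nil => simp [PySem.Chars.count.go]
    | cons x t =>
      simp only [List.length_cons, Nat.succ_le_succ_iff] at h
      by_cases hx : x = c
      · subst hx
        have : [x].isPrefixOf (x :: t) = true := by simp [List.isPrefixOf]
        simp [PySem.Chars.count.go, this, ih t (acc + 1) h]
        omega
      · have : [c].isPrefixOf (x :: t) = false := by
          simp [List.isPrefixOf]
          exact fun hcx => (hx hcx.symm).elim
        simp [PySem.Chars.count.go, this, ih t acc h, hx]

lemma pvStrCount_single (s : String) (c : Char) :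
    PySem.Str.count s (String.mk [c]) = s.toList.count c := by
  have h1 : (String.mk [c]).toList = [c] := Eq.symm ((fun {l} {s} => String.ofList_eq.mp) rfl)
  simp only [PySem.Str.count, h1, PySem.Chars.count, List.isEmpty_cons, if_neg Bool.false_ne_true]
  simpa using pvCountGo_single c s.toList s.toList.length 0 le_rfl

-- the padded squared distance expands into pure squares plus a cross term over the overlap
lemma pvZipLongest_sum_expand (xs ys : List Char) :
    ((pvZipLongest xs ys (Char.ofNat 0)).map
      (fun p => ((p.1.toNat : Int) - (p.2.toNat : Int)) ^ 2)).sum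
    = (xs.map (fun c => ((c.toNat : Int)) ^ 2)).sum
      + (ys.map (fun c => ((c.toNat : Int)) ^ 2)).sum
      - 2 * ((xs.zip ys).map (fun p => (p.1.toNat : Int) * (p.2.toNat : Int))).sum := by
  induction xs generalizing ys with
  | nil =>
    induction ys with
    | nil => simp [pvZipLongest]
    | cons y t ih => simp [pvZipLongest] at ih ⊢; omega
  | cons x xs ih =>
    cases ys with
    | nil =>
      have h : ∀ t : List Char,
          ((pvZipLongest t [] (Char.ofNat 0)).map
            (fun p => ((p.1.toNat : Int) - (p.2.toNat : Int)) ^ 2)).sum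
          = (t.map (fun c => ((c.toNat : Int)) ^ 2)).sum := by
        intro t
        induction t with
        | nil => simp [pvZipLongest]
        | cons a t iht => simp [pvZipLongest, iht]
      simp [h (x :: xs)]
    | cons y ys =>
      simp only [pvZipLongest, List.zip_cons_cons, List.map_cons, List.sum_cons, ih ys]
      ring

theorem analyse_string_spec : Claim_equal_analyse_string := by
  intro string _
  unfold Spec_analyse_string analyse_string analyse_string_alt
  have hfold : string.toList.foldl
      (fun d c => d.insert (String.mk [c]) (d.getD (String.mk [c]) 0 + 1))
      (PySem.Dict.empty : PySem.Dict String Int)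
      = (string.toList.map (fun c => String.mk [c])).foldl
        (fun d x => d.insert x (d.getD x 0 + 1)) PySem.Dict.empty := by
    rw [List.foldl_map]
  refine Prod.ext ?_ (Prod.ext ?_ ?_)
  · -- q-count = dict lookup
    show ((PySem.Str.count string "q" : Nat) : Int) = _
    have hinj : Function.Injective (fun c => String.mk [c]) := by
      intro a b hab
      have h := congrArg String.toList hab
      simp only [] at h
      rw [show ((String.mk [a]).toList) = [a] from Eq.symm ((fun {l} {s} => String.ofList_eq.mp) rfl),
        show ((String.mk [b]).toList) = [b] from Eq.symm ((fun {l} {s} => String.ofList_eq.mp) rfl)] at h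
      exact List.singleton_injective h
    have hc := List.count_map_of_injective string.toList (fun c => String.mk [c]) hinj 'q'
    simp only [hfold, PySem.Dict.getD_foldl_insert_add_one, PySem.Dict.getD_empty, zero_add]
    rw [show ("q" : String) = String.mk ['q'] from rfl, hc, pvStrCount_single]
  · -- unique characters: dict keys = set of the mapped characters
    show PySem.List.sorted (PySem.Set.ofList _) _ false = PySem.List.sorted _ _ false
    congr 1
    rw [hfold, PySem.Dict.keys_foldl_insert]
    rfl
  · -- distance: padded squares = squares + squares - 2·cross
    exact pvZipLongest_sum_expand string.toList "pineapple".toList
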